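-- pv_equiv track=rewrite | github.com/joo9906/Algorithm_study | Test/note3.py | analyze_treasures
-- ===== SOURCE A (Python) =====
-- def analyze_treasures(treasure_list, threshold):
--     result = {}
--     for i in treasure_list:
--         if i in result.keys():
--             continue
--         else:
--             result[i] = treasure_list.count(i)
--     cnt = 0
--     for j in result.values():
--         if int(j) > threshold:
--            cnt += 1
--     return result, cnt
-- ===== SOURCE B (Python) =====
-- def analyze_treasures(treasure_list, threshold):
--     # Peel-and-partition: repeatedly take the first remaining value, drop all of
--     # its occurrences with one filter (their number is its count), and fuse the
--     # threshold test into the same step. No dict lookups, no repeated .count.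
--     result = {}
--     cnt = 0
--     rest = treasure_list
--     while rest:
--         x = rest[0]
--         remaining = [y for y in rest if y != x]
--         c = len(rest) - len(remaining)
--         result[x] = c
--         if c > threshold:
--             cnt += 1
--         rest = remaining
--     return result, cnt
-- ===== Notes on version B (the rewrite author's own statement) =====
-- stated objective: alternative
-- what changed: Replaces A's dict-membership loop with repeated full-list treasure_list.count scans by a peel-and-partition loop: take the first value of the remaining list, remove all its occurrences with one filter (count = length difference), record it and test the threshold in the same step, and iterate on the shrunken list.
import Mathlib
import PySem

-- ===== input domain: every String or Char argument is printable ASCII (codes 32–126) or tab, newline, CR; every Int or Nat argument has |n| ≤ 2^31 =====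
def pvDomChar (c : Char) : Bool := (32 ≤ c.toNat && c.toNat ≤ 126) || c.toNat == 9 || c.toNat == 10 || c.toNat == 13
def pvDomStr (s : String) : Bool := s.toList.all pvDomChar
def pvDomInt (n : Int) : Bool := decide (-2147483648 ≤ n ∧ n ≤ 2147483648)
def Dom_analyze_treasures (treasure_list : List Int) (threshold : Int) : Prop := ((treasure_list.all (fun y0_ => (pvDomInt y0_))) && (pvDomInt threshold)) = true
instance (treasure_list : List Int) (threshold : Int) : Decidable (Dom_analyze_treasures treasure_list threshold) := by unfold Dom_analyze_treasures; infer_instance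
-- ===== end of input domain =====

-- B replaces A's dict-membership loop with repeated full-list .count scans by a
-- peel-and-partition loop (take first remaining value, drop its occurrences with
-- one filter, threshold test fused); each pass scans only the unprocessed remainder.

-- ===== PORT A =====
-- for i in treasure_list: if i in result: continue; else result[i] = treasure_list.count(i)
-- then cnt = number of values > threshold (int(j) on an int is the identity)
def analyze_treasures (treasure_list : List Int) (threshold : Int) : (List (Int × Int)) × Int :=
  let result := treasure_list.foldl
    (fun d i => if d.contains i then d else d.insert i ((treasure_list.count i : Int)))
    PySem.Dict.empty
  let cnt := result.values.foldl (fun c j => if j > threshold then c + 1 else c) (0 : Int)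
  (result.items, cnt)

-- ===== PORT B =====
-- the while-loop of Source B: state (result, cnt, rest), one step per distinct value
def analyze_treasures_altLoop (threshold : Int) (result : PySem.Dict Int Int) (cnt : Int)
    (rest : List Int) : (List (Int × Int)) × Int :=
  match rest with
  | [] => (result.items, cnt)
  | x :: xs =>
    let remaining := (x :: xs).filter (fun y => decide (y ≠ x))
    let c : Int := ((x :: xs).length : Int) - (remaining.length : Int)
    analyze_treasures_altLoop threshold (result.insert x c)
      (if c > threshold then cnt + 1 else cnt) remaining
termination_by rest.length
decreasing_by
  simp only [List.filter_cons, ne_eq, not_true_eq_false, decide_false, List.length_cons]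
  exact Nat.lt_succ_of_le (List.length_filter_le _ _)

def analyze_treasures_alt (treasure_list : List Int) (threshold : Int) : (List (Int × Int)) × Int :=
  analyze_treasures_altLoop threshold PySem.Dict.empty 0 treasure_list

-- ===== PRECONDITION & SPEC =====
def Spec_analyze_treasures (treasure_list : List Int) (threshold : Int) (out : (List (Int × Int)) × Int) : Prop := out = analyze_treasures_alt treasure_list threshold
instance (treasure_list : List Int) (threshold : Int) (out : (List (Int × Int)) × Int) : Decidable (Spec_analyze_treasures treasure_list threshold out) := by unfold Spec_analyze_treasures; infer_instance

-- ===== CLAIM (what is proved, stated in full; the proofs are below) =====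
def Claim_equal_analyze_treasures : Prop := ∀ (treasure_list : List Int) (threshold : Int), Dom_analyze_treasures treasure_list threshold → Spec_analyze_treasures treasure_list threshold (analyze_treasures treasure_list threshold)

-- ===== LEMMAS AND PROOFS =====

-- the peel order of a list: its first element, then the peel order of the rest with it removed
def pvDD : List Int → List Int
  | [] => []
  | x :: xs => x :: pvDD (xs.filter (fun y => decide (y ≠ x)))
termination_by l => l.length
decreasing_by
  simp only [List.length_unattach, List.length_cons]
  exact Nat.lt_succ_of_le (le_trans (List.length_filter_le _ _) (by simp))

theorem pv_mem_dd : ∀ (n : Nat) (l : List Int), l.length ≤ n → ∀ k ∈ pvDD l, k ∈ l := by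
  intro n
  induction n with
  | zero =>
    intro l hl
    cases l with
    | nil => simp [pvDD]
    | cons x xs => simp at hl
  | succ n ih =>
    intro l hl k hk
    cases l with
    | nil => simp [pvDD] at hk
    | cons x xs =>
      rw [pvDD] at hk
      have hlen : (xs.filter (fun y => decide (y ≠ x))).length ≤ n := by
        have h1 := List.length_filter_le (fun y => decide (y ≠ x)) xs
        simp only [List.length_cons] at hl
        omega
      rcases List.mem_cons.mp hk with h | h
      · simp [h]
      · have hm := ih _ hlen k h
        exact List.mem_cons_of_mem _ (List.mem_filter.mp hm).1

-- A's first-occurrence insertion loop, started from a dict whose items are s paired with a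
-- fixed count function c, ends with items = (s updated by l) paired with c.
theorem pv_itemsA (c : Int → Int) (l : List Int) : ∀ (s : PySem.Set Int),
    (l.foldl (fun d i => if d.contains i then d else d.insert i (c i))
       (PySem.Dict.mk (s.map (fun k => (k, c k))))).items
    = (PySem.Set.update s l).map (fun k => (k, c k)) := by
  induction l with
  | nil => intro s; simp [PySem.Set.update]
  | cons x l ih =>
    intro s
    by_cases hx : x ∈ s
    · have hc : (PySem.Dict.mk (s.map (fun k => (k, c k)))).contains x = true := by
        simp [PySem.Dict.contains, List.any_map, hx]
      simp only [List.foldl_cons, hc, PySem.Set.update_cons, PySem.Set.add_of_mem hx]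
      exact ih s
    · have hc : (PySem.Dict.mk (s.map (fun k => (k, c k)))).contains x = false := by
        simp [PySem.Dict.contains, List.any_map]
        intro y hy h; exact absurd (h ▸ hy) hx
      have hins : (PySem.Dict.mk (s.map (fun k => (k, c k)))).insert x (c x)
          = PySem.Dict.mk ((s ++ [x]).map (fun k => (k, c k))) := by
        simp [PySem.Dict.insert, hc]
      simp only [List.foldl_cons, hc, Bool.false_eq_true, if_false, hins,
        PySem.Set.update_cons, PySem.Set.add_of_not_mem hx]
      exact ih (s ++ [x])

-- set-update with accumulator IS the peel order of the not-yet-seen elements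
theorem pv_update_dd : ∀ (n : Nat) (l : List Int), l.length ≤ n → ∀ (s : PySem.Set Int),
    PySem.Set.update s l = s ++ pvDD (l.filter (fun y => decide (¬ s.contains y))) := by
  intro n
  induction n with
  | zero =>
    intro l hl s
    cases l with
    | nil => simp [PySem.Set.update, pvDD]
    | cons x xs => simp at hl
  | succ n ih =>
    intro l hl s
    cases l with
    | nil => simp [PySem.Set.update, pvDD]
    | cons x xs =>
      have hlen : xs.length ≤ n := by simp only [List.length_cons] at hl; omega
      by_cases hx : x ∈ s
      · have hco : PySem.Set.contains s x = true := by simpa [PySem.Set.contains] using hx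
        rw [PySem.Set.update_cons, PySem.Set.add_of_mem hx,
          List.filter_cons_of_neg (by simp [hx])]
        exact ih xs hlen s
      · have hco : PySem.Set.contains s x = false := by simpa [PySem.Set.contains] using hx
        rw [PySem.Set.update_cons, PySem.Set.add_of_not_mem hx, ih xs hlen (s ++ [x]),
          List.filter_cons_of_pos (by simp [hx]), pvDD, List.filter_filter]
        have hfil : xs.filter (fun y => decide (¬ PySem.Set.contains (s ++ [x]) y))
            = xs.filter (fun a => decide (a ≠ x) && decide (¬ PySem.Set.contains s a)) := by
          apply List.filter_congr
          intro a _
          by_cases h1 : a ∈ s <;> by_cases h2 : a = x <;>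
            simp [PySem.Set.contains, h1, h2]
        rw [hfil]
        simp

-- B's loop run from any fresh state, characterised by the peel order and the counts
theorem pv_altLoop (t : Int) : ∀ (n : Nat) (r : List Int), r.length ≤ n →
    ∀ (d : PySem.Dict Int Int) (cnt : Int), (∀ k ∈ r, d.contains k = false) →
    analyze_treasures_altLoop t d cnt r
      = (d.items ++ (pvDD r).map (fun k => (k, (r.count k : Int))),
         cnt + ((pvDD r).countP (fun k => decide (t < (r.count k : Int))) : Int)) := by
  intro n
  induction n with
  | zero =>
    intro r hr d cnt _
    cases r with
    | nil => simp [analyze_treasures_altLoop, pvDD]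
    | cons x xs => simp at hr
  | succ n ih =>
    intro r hr d cnt hfresh
    cases r with
    | nil => simp [analyze_treasures_altLoop, pvDD]
    | cons x xs =>
      have hrem : (x :: xs).filter (fun y => decide (y ≠ x)) = xs.filter (fun y => decide (y ≠ x)) := by
        simp
      have hlen : (xs.filter (fun y => decide (y ≠ x))).length ≤ n := by
        have h1 := List.length_filter_le (fun y => decide (y ≠ x)) xs
        simp only [List.length_cons] at hr
        omega
      have hcount : ((x :: xs).length : Int)
          - ((xs.filter (fun y => decide (y ≠ x))).length : Int) = ((x :: xs).count x : Int) := by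
        have h1 : (xs.filter (fun y => decide (y ≠ x))).length
            = xs.countP (fun y => decide (y ≠ x)) := List.countP_eq_length_filter.symm
        have h2 : xs.length = xs.countP (fun y => decide (y ≠ x))
            + xs.countP (fun y => decide (¬ (decide (y ≠ x) = true))) :=
          List.length_eq_countP_add_countP _
        have h3 : xs.count x = xs.countP (fun y => decide (¬ (decide (y ≠ x) = true))) := by
          unfold List.count
          apply List.countP_congr
          intro a _
          by_cases h : a = x <;> simp [h]
        rw [List.count_cons_self]
        have h4 : (x :: xs).length = xs.length + 1 := by simp
        push_cast [h1, h4]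
        omega
      have hdx : d.contains x = false := hfresh x (by simp)
      have hfresh' : ∀ k ∈ xs.filter (fun y => decide (y ≠ x)),
          (d.insert x (((x :: xs).length : Int)
            - (((x :: xs).filter (fun y => decide (y ≠ x))).length : Int))).contains k = false := by
        intro k hk
        simp only [List.mem_filter, decide_eq_true_eq] at hk
        rw [PySem.Dict.contains_insert]
        have : d.contains k = false := hfresh k (List.mem_cons_of_mem _ hk.1)
        simp [this, hk.2]
      rw [analyze_treasures_altLoop]
      simp only [hrem] at hfresh' ⊢
      rw [ih _ hlen _ _ hfresh']
      rw [PySem.Dict.items_insert_of_not_contains _ _ hdx]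
      -- counts in the filtered rest agree with counts in the whole rest, on its peel order
      have hmapeq : (pvDD (xs.filter (fun y => decide (y ≠ x)))).map
            (fun k => (k, ((xs.filter (fun y => decide (y ≠ x))).count k : Int)))
          = (pvDD (xs.filter (fun y => decide (y ≠ x)))).map
            (fun k => (k, ((x :: xs).count k : Int))) := by
        apply List.map_congr_left
        intro k hk
        have hkmem := pv_mem_dd _ _ (le_refl _) k hk
        simp only [List.mem_filter, decide_eq_true_eq] at hkmem
        rw [List.count_filter (by simp [hkmem.2]), List.count_cons_of_ne (Ne.symm hkmem.2)]
      have hcnteq : (pvDD (xs.filter (fun y => decide (y ≠ x)))).countP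
            (fun k => decide (t < ((xs.filter (fun y => decide (y ≠ x))).count k : Int)))
          = (pvDD (xs.filter (fun y => decide (y ≠ x)))).countP
            (fun k => decide (t < ((x :: xs).count k : Int))) := by
        apply List.countP_congr
        intro k hk
        have hkmem := pv_mem_dd _ _ (le_refl _) k hk
        simp only [List.mem_filter, decide_eq_true_eq] at hkmem
        rw [List.count_filter (by simp [hkmem.2]), List.count_cons_of_ne (Ne.symm hkmem.2)]
      rw [hmapeq, hcnteq, hcount]
      rw [pvDD]
      simp only [List.map_cons, List.countP_cons, List.append_assoc, List.cons_append,
        List.nil_append, Prod.mk.injEq]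
      refine ⟨trivial, ?_⟩
      · by_cases ht : t < ((x :: xs).count x : Int)
        · simp only [gt_iff_lt, ht, decide_true]
          push_cast
          ring
        · simp only [gt_iff_lt, ht, decide_false, Nat.cast_add]
          push_cast
          ring

-- ===== VERDICT (by name: the statement is the Claim_ definition above) =====
theorem analyze_treasures_spec : Claim_equal_analyze_treasures := by
  intro xs t _
  unfold Spec_analyze_treasures
  unfold analyze_treasures analyze_treasures_alt
  have hA := pv_itemsA (fun k => (xs.count k : Int)) xs []
  simp only [List.map_nil] at hA
  have hdd : PySem.Set.update ([] : PySem.Set Int) xs = pvDD xs := by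
    rw [pv_update_dd xs.length xs (le_refl _)]
    have : xs.filter (fun y => decide (¬ PySem.Set.contains ([] : PySem.Set Int) y)) = xs := by
      apply List.filter_eq_self.mpr
      intro a _
      simp [PySem.Set.contains]
    rw [this]
    simp
  have hB := pv_altLoop t xs.length xs (le_refl _) PySem.Dict.empty 0
    (by intro k _; simp [PySem.Dict.contains, PySem.Dict.empty])
  rw [hB]
  have hempty : (PySem.Dict.mk ([] : List (Int × Int))) = PySem.Dict.empty := rfl
  rw [hempty] at hA
  have hitems : (xs.foldl (fun d i => if d.contains i then d else d.insert i ((xs.count i : Int)))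
      PySem.Dict.empty).items = (pvDD xs).map (fun k => (k, (xs.count k : Int))) := by
    rw [hA, hdd]
  have hvals : (xs.foldl (fun d i => if d.contains i then d else d.insert i ((xs.count i : Int)))
      PySem.Dict.empty).values = (pvDD xs).map (fun k => (xs.count k : Int)) := by
    simp only [PySem.Dict.values, hitems, List.map_map]
    rfl
  have h0 : (PySem.Dict.empty : PySem.Dict Int Int).items = [] := rfl
  simp only [hitems, hvals, h0, List.nil_append, Prod.mk.injEq]
  constructor
  · trivial
  · have hfold := PySem.List.foldl_count_if (fun j : Int => decide (t < j))
      ((pvDD xs).map (fun k => (xs.count k : Int))) 0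
    simp only [decide_eq_true_eq] at hfold
    rw [show (fun (c j : Int) => if j > t then c + 1 else c)
        = (fun (c j : Int) => if t < j then c + 1 else c) from rfl, hfold,
      List.countP_map]
    simp [Function.comp_def]
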